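-- pv_equiv track=rewrite | github.com/ColworxDev/MIU_Algorithms | Algorithm - CS435/Assign7_R_2_19.py | prepareHashChaning
-- ===== SOURCE A (Python) =====
-- N = 11
--
-- def hash_get(k):
--     return (2*k+5) % N
--
-- def prepareHashChaning(l):
--     New_dict = {}
--     for j in range(0, len(l)):
--         i = hash_get(l[j])
--         if i in New_dict:
--             New_dict[i].append(l[j])
--         else:
--             New_dict[i] = [l[j]]
--     return New_dict
-- ===== SOURCE B (Python) =====
-- N = 11
--
-- def hash_get(k):
--     return (2*k+5) % N
--
-- def prepareHashChaning(l):
--     keys = dict.fromkeys(hash_get(x) for x in l)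
--     return {h: [x for x in l if hash_get(x) == h] for h in keys}
-- ===== Notes on version B (the rewrite author's own statement) =====
-- stated objective: alternative
-- what changed: Replaces the single-pass insert-or-append dict bucketing with a two-phase decomposition: first dedup the hash keys in first-occurrence order (dict.fromkeys), then build each bucket by a comprehension filtering the list for that key.
import Mathlib
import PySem

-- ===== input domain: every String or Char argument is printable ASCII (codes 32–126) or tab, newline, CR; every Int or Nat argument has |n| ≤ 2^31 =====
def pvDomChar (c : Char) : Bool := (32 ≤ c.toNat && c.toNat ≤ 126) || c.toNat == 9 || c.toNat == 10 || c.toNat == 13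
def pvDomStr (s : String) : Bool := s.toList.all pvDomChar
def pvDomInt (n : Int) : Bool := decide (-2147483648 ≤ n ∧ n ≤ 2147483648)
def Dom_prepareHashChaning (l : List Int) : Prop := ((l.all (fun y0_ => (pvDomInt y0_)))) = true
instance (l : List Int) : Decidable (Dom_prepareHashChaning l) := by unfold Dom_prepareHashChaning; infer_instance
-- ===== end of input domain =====

-- B replaces A's single-pass insert-or-append dict bucketing by a two-phase build:
-- dedup the hash keys in first-occurrence order, then filter the list once per key (alternative decomposition, same results).


-- ===== PORT A =====
-- hash_get(k) = (2*k+5) % N with N = 11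
def hashGetA (k : Int) : Int := PySem.Int.mod (2 * k + 5) 11

-- for j in range(0, len(l)): i = hash_get(l[j]); if i in d: d[i].append(l[j]) else d[i] = [l[j]]
-- (l[j] via pyGetD with dummy default: j ∈ range(len(l)) is always in range)
def prepareHashChaning (l : List Int) : List (Int × List Int) :=
  ((PySem.List.pyRange 0 (PySem.List.len l)).foldl
    (fun (d : PySem.Dict Int (List Int)) j =>
      let i := hashGetA (PySem.List.pyGetD l j 0)
      if d.contains i then d.modify i [] (fun v => v ++ [PySem.List.pyGetD l j 0])
      else d.insert i [PySem.List.pyGetD l j 0])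
    PySem.Dict.empty).items

-- ===== PORT B =====
def hashGetB (k : Int) : Int := PySem.Int.mod (2 * k + 5) 11

-- keys = dict.fromkeys(hash_get(x) for x in l); {h: [x for x in l if hash_get(x) == h] for h in keys}
def prepareHashChaning_alt (l : List Int) : List (Int × List Int) :=
  (PySem.List.dedup (l.map hashGetB)).map
    (fun h => (h, l.filter (fun x => hashGetB x == h)))

-- ===== PRECONDITION & SPEC =====
def Spec_prepareHashChaning (l : List Int) (out : List (Int × List Int)) : Prop := out = prepareHashChaning_alt l
instance (l : List Int) (out : List (Int × List Int)) : Decidable (Spec_prepareHashChaning l out) := by unfold Spec_prepareHashChaning; infer_instance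

-- ===== CLAIM (what is proved, stated in full; the proofs are below) =====
def Claim_equal_prepareHashChaning : Prop := ∀ (l : List Int), Dom_prepareHashChaning l → Spec_prepareHashChaning l (prepareHashChaning l)

-- ===== LEMMAS AND PROOFS =====

-- A's branch (insert-or-append) is exactly Python's d.modify with default []
lemma stepA_eq_modify (d : PySem.Dict Int (List Int)) (i x : Int) :
    (if d.contains i then d.modify i [] (fun v => v ++ [x]) else d.insert i [x]) =
      d.modify i [] (fun v => v ++ [x]) := by
  by_cases h : d.contains i = true
  · simp [h]
  · simp at h
    simp [PySem.Dict.modify, PySem.Dict.insert, h, PySem.Dict.getD_of_not_contains d [] h]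

-- A's loop folded over the list itself, as a modify-loop
lemma prepareHashChaning_eq_modify_fold (l : List Int) :
    prepareHashChaning l =
      ((l.map (fun x => (hashGetA x, x))).foldl
        (fun (d : PySem.Dict Int (List Int)) p => d.modify p.1 [] (fun v => v ++ [p.2]))
        PySem.Dict.empty).items := by
  unfold prepareHashChaning
  rw [PySem.List.foldl_pyRange_pyGetD l 0
        (fun d x =>
          if PySem.Dict.contains d (hashGetA x) then
            PySem.Dict.modify d (hashGetA x) [] (fun v => v ++ [x])
          else PySem.Dict.insert d (hashGetA x) [x])
        PySem.Dict.empty le_rfl]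
  simp only [Int.toNat_zero, List.drop_zero, List.foldl_map]
  congr 1
  apply PySem.List.foldl_congr_mem
  intro d x _
  exact stepA_eq_modify d (hashGetA x) x

theorem prepareHashChaning_spec_aux (l : List Int) :
    prepareHashChaning l = prepareHashChaning_alt l := by
  rw [prepareHashChaning_eq_modify_fold]
  set pairs := l.map (fun x => (hashGetA x, x)) with hpairs
  set D := pairs.foldl
      (fun (d : PySem.Dict Int (List Int)) p => d.modify p.1 [] (fun v => v ++ [p.2]))
      PySem.Dict.empty with hD
  have hnd : D.keys.Nodup := by
    rw [hD]
    have := PySem.Dict.nodup_keys_foldl_modify_key (κ := Int) (ν := List Int)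
      pairs (fun p => p.1) [] (fun _ p v => v ++ [p.2]) PySem.Dict.empty (by simp)
    simpa using this
  have hkeys : D.keys = PySem.List.dedup (l.map hashGetA) := by
    rw [hD]
    have := PySem.Dict.keys_foldl_modify_key (κ := Int) (ν := List Int)
      pairs (fun p => p.1) [] (fun _ p v => v ++ [p.2]) PySem.Dict.empty
    rw [this, PySem.List.dedup_eq_ofList]
    simp only [hpairs, List.map_map]
    rfl
  rw [PySem.Dict.items_eq_map_keys D hnd [], hkeys]
  unfold prepareHashChaning_alt
  have hh : hashGetB = hashGetA := rfl
  rw [hh]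
  apply List.map_congr_left
  intro k _
  have hget : D.getD k [] = l.filter (fun x => hashGetA x == k) := by
    rw [hD, PySem.Dict.getD_foldl_modify_append pairs PySem.Dict.empty k, hpairs]
    rw [List.filter_map]
    simp [Function.comp_def]
  rw [hget]

-- ===== VERDICT (by name: the statement is the Claim_ definition above) =====
theorem prepareHashChaning_spec : Claim_equal_prepareHashChaning := by
  intro l _
  unfold Spec_prepareHashChaning
  exact prepareHashChaning_spec_aux l
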